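-- pv_equiv track=rewrite | github.com/oamatiskak-star/sterkbouw-saas-executor | src/analyzers/cost_analyzer.py | _map_to_stabu
-- ===== SOURCE A (Python) =====
-- from typing import Dict, List, Optional, Any, Tuple
--
-- def _map_to_stabu(
--
--     element_type: Optional[str],
--     material: Optional[str],
--     context: Optional[Dict[str, Any]]
-- ) -> str:
--     """Map element naar STABU code"""
--     if not element_type:
--         return "99.9"
--
--     element_lower = element_type.lower()
--     material_lower = (material or "").lower()
--
--     # Simpele mapping (in productie: uitgebreide database)
--     if any(word in element_lower for word in ["wall", "muur", "wand"]):
--         if "load" in element_lower or "drag" in element_lower: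
--             return "3.1"  # Draagmuur
--         else:
--             return "4.2"  # Scheidingswand
--
--     elif any(word in element_lower for word in ["window", "raam"]):
--         return "7.1"  # Kozijnen en ramen
--
--     elif any(word in element_lower for word in ["door", "deur"]):
--         return "7.2"  # Deuren
--
--     elif any(word in element_lower for word in ["floor", "vloer"]):
--         if "concrete" in material_lower or "beton" in material_lower:
--             return "3.2"  # Betonvloer
--         else:
--             return "5.3"  # Houten vloer
--
--     elif any(word in element_lower for word in ["roof", "dak"]):
--         return "6.1"  # Dakconstructie
--
--     elif any(word in element_lower for word in ["foundation", "fundering"]):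
--         return "2.3"  # Fundering
--
--     elif any(word in element_lower for word in ["insulation", "isolatie"]):
--         return "8.1"  # Isolatie
--
--     return "99.9"  # Overig
-- ===== SOURCE B (Python) =====
-- from typing import Dict, List, Optional, Any, Tuple
--
-- # Flat keyword -> priority map (priority = position of the group in the STABU
-- # classification); codes for the priorities that need no sub-decision.
-- _KEYWORD_PRIORITY = {
--     "wall": 0, "muur": 0, "wand": 0,
--     "window": 1, "raam": 1,
--     "door": 2, "deur": 2,
--     "floor": 3, "vloer": 3,
--     "roof": 4, "dak": 4,
--     "foundation": 5, "fundering": 5,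
--     "insulation": 6, "isolatie": 6,
-- }
-- _CODES = {1: "7.1", 2: "7.2", 4: "6.1", 5: "2.3", 6: "8.1"}
--
--
-- def _map_to_stabu(
--     element_type: Optional[str],
--     material: Optional[str],
--     context: Optional[Dict[str, Any]]
-- ) -> str:
--     """Map element naar STABU code.
--
--     Staged: scan ALL keywords once collecting the priorities of those that
--     occur in the element name, take the minimum priority (= highest-ranked
--     group; correct because the groups are tried in priority order), then
--     decode that priority into a code, with the wall/floor sub-decisions.
--     """
--     if not element_type:
--         return "99.9"
--     el = element_type.lower()
--     ml = (material or "").lower()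
--     hits = [prio for kw, prio in _KEYWORD_PRIORITY.items() if kw in el]
--     if not hits:
--         return "99.9"
--     best = min(hits)
--     if best == 0:
--         return "3.1" if ("load" in el or "drag" in el) else "4.2"
--     if best == 3:
--         return "3.2" if ("concrete" in ml or "beton" in ml) else "5.3"
--     return _CODES[best]
-- ===== Notes on version B (the rewrite author's own statement) =====
-- stated objective: alternative
-- what changed: Instead of A's early-return if/elif chain trying keyword groups in order, B does one full scan of a flat keyword->priority map collecting the priorities of ALL keywords occurring in the element name, takes the minimum priority, and then decodes that priority into the code (with the wall/floor sub-decisions); correct because the groups are tried by A in priority order.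
import Mathlib
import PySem

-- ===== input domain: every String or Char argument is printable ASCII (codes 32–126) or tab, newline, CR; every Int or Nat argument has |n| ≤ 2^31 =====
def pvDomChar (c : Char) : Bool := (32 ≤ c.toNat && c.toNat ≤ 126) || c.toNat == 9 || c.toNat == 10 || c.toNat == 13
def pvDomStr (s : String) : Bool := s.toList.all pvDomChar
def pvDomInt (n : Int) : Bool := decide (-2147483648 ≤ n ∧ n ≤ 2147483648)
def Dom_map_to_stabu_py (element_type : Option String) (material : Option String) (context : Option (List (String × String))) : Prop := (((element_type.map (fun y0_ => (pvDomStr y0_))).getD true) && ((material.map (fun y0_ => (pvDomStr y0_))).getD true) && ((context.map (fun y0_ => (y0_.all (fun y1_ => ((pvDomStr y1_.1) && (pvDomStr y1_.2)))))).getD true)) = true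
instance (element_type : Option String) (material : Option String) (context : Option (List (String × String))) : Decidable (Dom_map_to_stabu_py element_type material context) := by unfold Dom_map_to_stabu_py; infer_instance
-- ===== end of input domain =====

-- B replaces A's first-match if/elif chain by a staged computation: one full scan over a
-- flat keyword->priority map collecting every matching priority, then min, then a decode
-- of the best priority (objective: alternative; same cost).

-- ===== PORT A =====
-- literal transliteration of A's if/elif chain
def map_to_stabu_py (element_type : Option String) (material : Option String) (_context : Option (List (String × String))) : String :=
  match element_type with
  | none => "99.9"
  | some et =>
    if et = "" then "99.9"
    else
      let element_lower := PySem.Str.lower et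
      let material_lower := PySem.Str.lower ((material.getD ""))
      if ["wall", "muur", "wand"].any (fun w => PySem.Str.isIn w element_lower) then
        if PySem.Str.isIn "load" element_lower || PySem.Str.isIn "drag" element_lower then "3.1"
        else "4.2"
      else if ["window", "raam"].any (fun w => PySem.Str.isIn w element_lower) then "7.1"
      else if ["door", "deur"].any (fun w => PySem.Str.isIn w element_lower) then "7.2"
      else if ["floor", "vloer"].any (fun w => PySem.Str.isIn w element_lower) then
        if PySem.Str.isIn "concrete" material_lower || PySem.Str.isIn "beton" material_lower then "3.2"
        else "5.3"
      else if ["roof", "dak"].any (fun w => PySem.Str.isIn w element_lower) then "6.1"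
      else if ["foundation", "fundering"].any (fun w => PySem.Str.isIn w element_lower) then "2.3"
      else if ["insulation", "isolatie"].any (fun w => PySem.Str.isIn w element_lower) then "8.1"
      else "99.9"

-- ===== PORT B =====
-- _KEYWORD_PRIORITY in Source B: flat keyword -> priority map
def stabuKeywordPriority : List (String × Nat) :=
  [ ("wall", 0), ("muur", 0), ("wand", 0),
    ("window", 1), ("raam", 1),
    ("door", 2), ("deur", 2),
    ("floor", 3), ("vloer", 3),
    ("roof", 4), ("dak", 4),
    ("foundation", 5), ("fundering", 5),
    ("insulation", 6), ("isolatie", 6) ]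

-- _CODES in Source B
def stabuCodes : PySem.Dict Nat String :=
  PySem.Dict.ofList [(1, "7.1"), (2, "7.2"), (4, "6.1"), (5, "2.3"), (6, "8.1")]

-- core of Source B after the guard: collect the priorities of ALL matching keywords,
-- take the minimum, decode it
def stabuDecode (el ml : String) : String :=
  let hits := (stabuKeywordPriority.filter (fun p => PySem.Str.isIn p.1 el)).map Prod.snd
  match PySem.List.min? hits (fun x => x) with
  | none => "99.9"
  | some best =>
    if best = 0 then
      if PySem.Str.isIn "load" el || PySem.Str.isIn "drag" el then "3.1" else "4.2"
    else if best = 3 then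
      if PySem.Str.isIn "concrete" ml || PySem.Str.isIn "beton" ml then "3.2" else "5.3"
    else
      -- _CODES[best]: the key is always present when this line is reached
      -- (best ∈ {1,2,4,5,6}), so Python's KeyError branch is unreachable and
      -- the getD default is never used
      (stabuCodes.get? best).getD "99.9"

def map_to_stabu_py_alt (element_type : Option String) (material : Option String) (_context : Option (List (String × String))) : String :=
  match element_type with
  | none => "99.9"
  | some et =>
    if et = "" then "99.9"
    else stabuDecode (PySem.Str.lower et) (PySem.Str.lower (material.getD ""))

-- ===== PRECONDITION & SPEC =====
def Spec_map_to_stabu_py (element_type : Option String) (material : Option String) (context : Option (List (String × String))) (out : String) : Prop := out = map_to_stabu_py_alt element_type material context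
instance (element_type : Option String) (material : Option String) (context : Option (List (String × String))) (out : String) : Decidable (Spec_map_to_stabu_py element_type material context out) := by unfold Spec_map_to_stabu_py; infer_instance

-- ===== CLAIM =====
def Claim_equal_map_to_stabu_py : Prop := ∀ (element_type : Option String) (material : Option String) (context : Option (List (String × String))), Dom_map_to_stabu_py element_type material context → Spec_map_to_stabu_py element_type material context (map_to_stabu_py element_type material context)

-- ===== LEMMAS AND PROOFS =====

-- min of a nondecreasing Nat list is its head
theorem min?_id_of_sorted (l : List Nat) (h : l.Pairwise (· ≤ ·)) :
    PySem.List.min? l (fun x => x) = l.head? := by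
  cases l with
  | nil => rfl
  | cons x t =>
    rw [PySem.List.min?_id_cons, List.head?_cons]
    congr 1
    rcases PySem.List.foldl_min_mem t x with h1 | h1
    · exact h1
    · exact le_antisymm (PySem.List.foldl_min_le t x).1 ((List.pairwise_cons.mp h).1 _ h1)

-- the priorities in the table are nondecreasing, so the min of the matching
-- priorities is the priority of the FIRST matching keyword
theorem stabu_hits (el : String) :
    PySem.List.min? ((stabuKeywordPriority.filter (fun p => PySem.Str.isIn p.1 el)).map Prod.snd) (fun x => x)
      = (stabuKeywordPriority.find? (fun p => PySem.Str.isIn p.1 el)).map Prod.snd := by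
  rw [min?_id_of_sorted, List.head?_map, List.head?_filter]
  exact (List.pairwise_map).mpr
    (List.Pairwise.sublist List.filter_sublist
      (show stabuKeywordPriority.Pairwise (fun a b => a.2 ≤ b.2) by decide))

-- B's min-then-decode agrees with A's first-match chain
theorem stabuDecode_eq_chain (el ml : String) :
    stabuDecode el ml =
      (if ["wall", "muur", "wand"].any (fun w => PySem.Str.isIn w el) then
        if PySem.Str.isIn "load" el || PySem.Str.isIn "drag" el then "3.1" else "4.2"
      else if ["window", "raam"].any (fun w => PySem.Str.isIn w el) then "7.1"
      else if ["door", "deur"].any (fun w => PySem.Str.isIn w el) then "7.2"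
      else if ["floor", "vloer"].any (fun w => PySem.Str.isIn w el) then
        if PySem.Str.isIn "concrete" ml || PySem.Str.isIn "beton" ml then "3.2" else "5.3"
      else if ["roof", "dak"].any (fun w => PySem.Str.isIn w el) then "6.1"
      else if ["foundation", "fundering"].any (fun w => PySem.Str.isIn w el) then "2.3"
      else if ["insulation", "isolatie"].any (fun w => PySem.Str.isIn w el) then "8.1"
      else "99.9") := by
  unfold stabuDecode
  simp only [stabu_hits]
  by_cases h1 : PySem.Chars.isIn ['w', 'a', 'l', 'l'] el.toList = true
  · simp [stabuKeywordPriority, h1]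
  by_cases h2 : PySem.Chars.isIn ['m', 'u', 'u', 'r'] el.toList = true
  · simp [stabuKeywordPriority, h1, h2]
  by_cases h3 : PySem.Chars.isIn ['w', 'a', 'n', 'd'] el.toList = true
  · simp [stabuKeywordPriority, h1, h2, h3]
  by_cases h4 : PySem.Chars.isIn ['w', 'i', 'n', 'd', 'o', 'w'] el.toList = true
  · simp [stabuKeywordPriority, stabuCodes, h1, h2, h3, h4]
    all_goals decide
  by_cases h5 : PySem.Chars.isIn ['r', 'a', 'a', 'm'] el.toList = true
  · simp [stabuKeywordPriority, stabuCodes, h1, h2, h3, h4, h5]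
    all_goals decide
  by_cases h6 : PySem.Chars.isIn ['d', 'o', 'o', 'r'] el.toList = true
  · simp [stabuKeywordPriority, stabuCodes, h1, h2, h3, h4, h5, h6]
    all_goals decide
  by_cases h7 : PySem.Chars.isIn ['d', 'e', 'u', 'r'] el.toList = true
  · simp [stabuKeywordPriority, stabuCodes, h1, h2, h3, h4, h5, h6, h7]
    all_goals decide
  by_cases h8 : PySem.Chars.isIn ['f', 'l', 'o', 'o', 'r'] el.toList = true
  · simp [stabuKeywordPriority, h1, h2, h3, h4, h5, h6, h7, h8]
  by_cases h9 : PySem.Chars.isIn ['v', 'l', 'o', 'e', 'r'] el.toList = true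
  · simp [stabuKeywordPriority, h1, h2, h3, h4, h5, h6, h7, h8, h9]
  by_cases h10 : PySem.Chars.isIn ['r', 'o', 'o', 'f'] el.toList = true
  · simp [stabuKeywordPriority, stabuCodes, h1, h2, h3, h4, h5, h6, h7, h8, h9, h10]
    all_goals decide
  by_cases h11 : PySem.Chars.isIn ['d', 'a', 'k'] el.toList = true
  · simp [stabuKeywordPriority, stabuCodes, h1, h2, h3, h4, h5, h6, h7, h8, h9, h10, h11]
    all_goals decide
  by_cases h12 : PySem.Chars.isIn ['f', 'o', 'u', 'n', 'd', 'a', 't', 'i', 'o', 'n'] el.toList = true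
  · simp [stabuKeywordPriority, stabuCodes, h1, h2, h3, h4, h5, h6, h7, h8, h9, h10, h11, h12]
    all_goals decide
  by_cases h13 : PySem.Chars.isIn ['f', 'u', 'n', 'd', 'e', 'r', 'i', 'n', 'g'] el.toList = true
  · simp [stabuKeywordPriority, stabuCodes, h1, h2, h3, h4, h5, h6, h7, h8, h9, h10, h11, h12, h13]
    all_goals decide
  by_cases h14 : PySem.Chars.isIn ['i', 'n', 's', 'u', 'l', 'a', 't', 'i', 'o', 'n'] el.toList = true
  · simp [stabuKeywordPriority, stabuCodes, h1, h2, h3, h4, h5, h6, h7, h8, h9, h10, h11, h12, h13, h14]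
    all_goals decide
  by_cases h15 : PySem.Chars.isIn ['i', 's', 'o', 'l', 'a', 't', 'i', 'e'] el.toList = true
  · simp [stabuKeywordPriority, stabuCodes, h1, h2, h3, h4, h5, h6, h7, h8, h9, h10, h11, h12, h13, h14, h15]
    all_goals decide
  · simp [stabuKeywordPriority, h1, h2, h3, h4, h5, h6, h7, h8, h9, h10, h11, h12, h13, h14, h15]

-- ===== VERDICT =====
theorem map_to_stabu_py_spec : Claim_equal_map_to_stabu_py := by
  intro element_type material context _
  unfold Spec_map_to_stabu_py map_to_stabu_py map_to_stabu_py_alt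
  cases element_type with
  | none => rfl
  | some et =>
    by_cases h : et = ""
    · simp [h]
    · simp only [h, if_false, stabuDecode_eq_chain]
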